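-- pv_equiv track=rewrite | github.com/Gugulator/home-energy-reporter | energy_report.py | parse_day_range
-- ===== SOURCE A (Python) =====
-- def parse_day_range(day_str):
--     days_of_week = ['Sunday', 'Monday', 'Tuesday', 'Wednesday', 'Thursday', 'Friday', 'Saturday']
--     days = []
--     for part in day_str.split(','):
--         if '-' in part:
--             start, end = part.split('-')
--             start_index = days_of_week.index(start)
--             end_index = days_of_week.index(end)
--             if start_index <= end_index:
--                 days.extend(days_of_week[start_index:end_index+1])
--             else:
--                 days.extend(days_of_week[start_index:] + days_of_week[:end_index+1])
--         else:
--             days.append(part)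
--     return days
-- ===== SOURCE B (Python) =====
-- def parse_day_range(day_str):
--     days_of_week = ['Sunday', 'Monday', 'Tuesday', 'Wednesday', 'Thursday', 'Friday', 'Saturday']
--     days = []
--     for part in day_str.split(','):
--         if '-' in part:
--             start, end = part.split('-')
--             start_index = days_of_week.index(start)
--             end_index = days_of_week.index(end)
--             count = (end_index - start_index) % 7 + 1
--             days.extend(days_of_week[(start_index + j) % 7] for j in range(count))
--         else:
--             days.append(part)
--     return days
-- ===== Notes on version B (the rewrite author's own statement) =====
-- stated objective: alternative
-- what changed: The two slice branches (contiguous slice vs wrap-around concatenation of two slices) are replaced by a single modular-arithmetic build: count = (end-start) % 7 + 1 items taken at indices (start+j) % 7.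
import Mathlib
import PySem

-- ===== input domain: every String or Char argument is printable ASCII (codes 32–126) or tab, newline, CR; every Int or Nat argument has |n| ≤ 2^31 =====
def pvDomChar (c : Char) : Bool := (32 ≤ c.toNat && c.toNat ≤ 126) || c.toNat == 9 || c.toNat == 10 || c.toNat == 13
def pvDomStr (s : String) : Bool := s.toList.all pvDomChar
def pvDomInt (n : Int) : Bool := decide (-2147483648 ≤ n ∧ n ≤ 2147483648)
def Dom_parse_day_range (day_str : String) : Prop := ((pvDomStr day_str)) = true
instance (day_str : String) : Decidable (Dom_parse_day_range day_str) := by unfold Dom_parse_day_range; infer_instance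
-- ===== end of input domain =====

-- B replaces A's two slice branches by one modular-index build; same cost, different decomposition.
-- s.split(sep) for the non-empty separators "," and "-" used below: split? is `some` for sep ≠ "".

-- ===== PORT A =====
def parse_day_range (day_str : String) : List String :=
  let days_of_week : List String :=
    ["Sunday", "Monday", "Tuesday", "Wednesday", "Thursday", "Friday", "Saturday"]
  ((PySem.Str.split? day_str ",").getD []).foldl (fun days part =>
    if PySem.Str.isIn "-" part then
      match (PySem.Str.split? part "-").getD [] with
      | [start, end_] =>
        match PySem.List.index? days_of_week start, PySem.List.index? days_of_week end_ with
        | some start_index, some end_index =>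
          if start_index ≤ end_index then
            days ++ PySem.List.slice days_of_week (some (start_index : Int)) (some ((end_index : Int) + 1))
          else
            days ++ (PySem.List.slice days_of_week (some (start_index : Int)) none
                     ++ PySem.List.slice days_of_week none (some ((end_index : Int) + 1)))
        | _, _ => days    -- Python: ValueError from .index(), excluded by Pre_
      | _ => days         -- Python: ValueError from the 2-tuple unpack, excluded by Pre_
    else days ++ [part]) []

-- ===== PORT B =====
def parse_day_range_alt (day_str : String) : List String :=
  let days_of_week : List String :=
    ["Sunday", "Monday", "Tuesday", "Wednesday", "Thursday", "Friday", "Saturday"]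
  ((PySem.Str.split? day_str ",").getD []).foldl (fun days part =>
    if PySem.Str.isIn "-" part then
      match (PySem.Str.split? part "-").getD [] with
      | [] => days        -- Python: ValueError from the 2-tuple unpack, excluded by Pre_
      | start :: rest =>
        match rest with
        | [] => days      -- Python: ValueError from the 2-tuple unpack, excluded by Pre_
        | end_ :: rest2 =>
          match rest2 with
          | _ :: _ => days  -- Python: ValueError from the 2-tuple unpack, excluded by Pre_
          | [] =>
            match PySem.List.index? days_of_week start with
            | none => days  -- Python: ValueError from .index(), excluded by Pre_
            | some start_index =>
              match PySem.List.index? days_of_week end_ with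
              | none => days  -- Python: ValueError from .index(), excluded by Pre_
              | some end_index =>
                let count := PySem.Int.mod ((end_index : Int) - (start_index : Int)) 7 + 1
                days ++ (PySem.List.pyRange 0 count 1).map
                          (fun j => PySem.List.pyGetD days_of_week (PySem.Int.mod ((start_index : Int) + j) 7) "")
    else days ++ [part]) []

-- ===== PRECONDITION & SPEC =====
-- Pre_ excludes exactly the inputs on which A raises ValueError (a '-' part that does not split
-- into exactly two valid day names: .index() misses, or the 2-tuple unpack fails).
def Pre_parse_day_range (day_str : String) : Prop :=
  ∀ part ∈ (PySem.Str.split? day_str ",").getD [],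
    PySem.Str.isIn "-" part = true →
      ((PySem.Str.split? part "-").getD []).length = 2 ∧
      ∀ x ∈ (PySem.Str.split? part "-").getD [],
        x ∈ ["Sunday", "Monday", "Tuesday", "Wednesday", "Thursday", "Friday", "Saturday"]
instance (day_str : String) : Decidable (Pre_parse_day_range day_str) := by
  unfold Pre_parse_day_range; infer_instance

def pvWitness_parse_day_range : String := "Friday-Monday,Tuesday,foo"

def Spec_parse_day_range (day_str : String) (out : List String) : Prop := out = parse_day_range_alt day_str
instance (day_str : String) (out : List String) : Decidable (Spec_parse_day_range day_str out) := by unfold Spec_parse_day_range; infer_instance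

-- ===== CLAIM (what is proved, stated in full; the proofs are below) =====
def Claim_equal_parse_day_range : Prop := ∀ (day_str : String), Dom_parse_day_range day_str → Pre_parse_day_range day_str → Spec_parse_day_range day_str (parse_day_range day_str)

-- ===== LEMMAS AND PROOFS =====

def pvWeek : List String :=
  ["Sunday", "Monday", "Tuesday", "Wednesday", "Thursday", "Friday", "Saturday"]

-- The two range constructions agree for any pair of valid day indices (finite check, 49 cases).
theorem pv_seg_eq : ∀ (si ei : Fin 7),
    (if si.val ≤ ei.val then
       PySem.List.slice pvWeek (some (si.val : Int)) (some ((ei.val : Int) + 1))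
     else
       PySem.List.slice pvWeek (some (si.val : Int)) none
       ++ PySem.List.slice pvWeek none (some ((ei.val : Int) + 1)))
    = (PySem.List.pyRange 0 (PySem.Int.mod ((ei.val : Int) - (si.val : Int)) 7 + 1) 1).map
        (fun j => PySem.List.pyGetD pvWeek (PySem.Int.mod ((si.val : Int) + j) 7) "") := by
  decide

theorem pv_index_lt {s : String} {k : Nat}
    (h : PySem.List.index? pvWeek s = some k) : k < 7 := by
  obtain ⟨hk, -⟩ := PySem.List.getElem_of_index?_eq_some h
  simpa [pvWeek] using hk

theorem pv_fold_eq (parts : List String) (acc : List String)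
    (h : ∀ part ∈ parts, PySem.Str.isIn "-" part = true →
      ((PySem.Str.split? part "-").getD []).length = 2 ∧
      ∀ x ∈ (PySem.Str.split? part "-").getD [], x ∈ pvWeek) :
    parts.foldl (fun days part =>
      if PySem.Str.isIn "-" part then
        match (PySem.Str.split? part "-").getD [] with
        | [start, end_] =>
          match PySem.List.index? pvWeek start, PySem.List.index? pvWeek end_ with
          | some start_index, some end_index =>
            if start_index ≤ end_index then
              days ++ PySem.List.slice pvWeek (some (start_index : Int)) (some ((end_index : Int) + 1))
            else
              days ++ (PySem.List.slice pvWeek (some (start_index : Int)) none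
                       ++ PySem.List.slice pvWeek none (some ((end_index : Int) + 1)))
          | _, _ => days
        | _ => days
      else days ++ [part]) acc
    = parts.foldl (fun days part =>
      if PySem.Str.isIn "-" part then
        match (PySem.Str.split? part "-").getD [] with
        | [] => days
        | start :: rest =>
          match rest with
          | [] => days
          | end_ :: rest2 =>
            match rest2 with
            | _ :: _ => days
            | [] =>
              match PySem.List.index? pvWeek start with
              | none => days
              | some start_index =>
                match PySem.List.index? pvWeek end_ with
                | none => days
                | some end_index =>
                  let count := PySem.Int.mod ((end_index : Int) - (start_index : Int)) 7 + 1
                  days ++ (PySem.List.pyRange 0 count 1).map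
                            (fun j => PySem.List.pyGetD pvWeek (PySem.Int.mod ((start_index : Int) + j) 7) "")
      else days ++ [part]) acc := by
  induction parts generalizing acc with
  | nil => rfl
  | cons p ps ih =>
    simp only [List.foldl_cons]
    have hstep :
        (if PySem.Str.isIn "-" p then
          match (PySem.Str.split? p "-").getD [] with
          | [start, end_] =>
            match PySem.List.index? pvWeek start, PySem.List.index? pvWeek end_ with
            | some start_index, some end_index =>
              if start_index ≤ end_index then
                acc ++ PySem.List.slice pvWeek (some (start_index : Int)) (some ((end_index : Int) + 1))
              else
                acc ++ (PySem.List.slice pvWeek (some (start_index : Int)) none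
                        ++ PySem.List.slice pvWeek none (some ((end_index : Int) + 1)))
            | _, _ => acc
          | _ => acc
        else acc ++ [p])
        = (if PySem.Str.isIn "-" p then
          match (PySem.Str.split? p "-").getD [] with
          | [] => acc
          | start :: rest =>
            match rest with
            | [] => acc
            | end_ :: rest2 =>
              match rest2 with
              | _ :: _ => acc
              | [] =>
                match PySem.List.index? pvWeek start with
                | none => acc
                | some start_index =>
                  match PySem.List.index? pvWeek end_ with
                  | none => acc
                  | some end_index =>
                    let count := PySem.Int.mod ((end_index : Int) - (start_index : Int)) 7 + 1
                    acc ++ (PySem.List.pyRange 0 count 1).map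
                              (fun j => PySem.List.pyGetD pvWeek (PySem.Int.mod ((start_index : Int) + j) 7) "")
        else acc ++ [p]) := by
      by_cases hin : PySem.Str.isIn "-" p = true
      · obtain ⟨hlen, hmem⟩ := h p (List.mem_cons_self ..) hin
        simp only [hin, if_pos]
        cases hsplit : (PySem.Str.split? p "-").getD [] with
        | nil => exact absurd hlen (by simp [hsplit])
        | cons a t =>
          cases t with
          | nil => exact absurd hlen (by simp [hsplit])
          | cons b t2 =>
            cases t2 with
            | cons c t3 => exact absurd hlen (by simp [hsplit])
            | nil =>
              rw [hsplit] at hmem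
              have ha : a ∈ pvWeek := hmem a (by simp)
              have hb : b ∈ pvWeek := hmem b (by simp)
              obtain ⟨si, hsi⟩ := Option.isSome_iff_exists.mp
                ((PySem.List.index?_isSome_iff ..).mpr ha)
              obtain ⟨ei, hei⟩ := Option.isSome_iff_exists.mp
                ((PySem.List.index?_isSome_iff ..).mpr hb)
              simp only [hsi, hei]
              rw [← pv_seg_eq ⟨si, pv_index_lt hsi⟩ ⟨ei, pv_index_lt hei⟩]
              split <;> rfl
      · rw [if_neg hin, if_neg hin]
    rw [hstep]
    exact ih _ (fun q hq => h q (List.mem_cons_of_mem _ hq))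

-- ===== VERDICT (by name: the statement is the Claim_ definition above) =====
theorem parse_day_range_spec : Claim_equal_parse_day_range := by
  intro day_str _ hpre
  unfold Spec_parse_day_range parse_day_range parse_day_range_alt
  refine pv_fold_eq _ _ (fun part hp hin => ?_)
  obtain ⟨h1, h2⟩ := hpre part hp hin
  exact ⟨h1, fun x hx => by simpa [pvWeek] using h2 x hx⟩
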